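-- pv_equiv track=rewrite | github.com/Jamie03/Set_Calculator | Parser.py | reduce_set
-- ===== SOURCE A (Python) =====
-- def reduce_set(merged):
--     if type(merged) is list:
--         new_set = merged.pop()
--     else:
--         new_set = merged
--
--     A = list(new_set)
--
--     if "{" in A:
--         A.remove('{')
--     if "}" in A:
--         A.remove('}')
--
--     while ',' in A:
--         A.remove(',')
--
--     return A
-- ===== SOURCE B (Python) =====
-- def reduce_set(merged):
--     if type(merged) is list:
--         new_set = merged.pop()
--     else:
--         new_set = merged
--
--     out = []
--     dropped_open = False
--     dropped_close = False
--     for ch in new_set: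
--         if ch == '{' and not dropped_open:
--             dropped_open = True
--         elif ch == '}' and not dropped_close:
--             dropped_close = True
--         elif ch == ',':
--             pass
--         else:
--             out.append(ch)
--     return out
-- ===== Notes on version B (the rewrite author's own statement) =====
-- stated objective: alternative
-- what changed: Replaces A's membership tests plus two .remove scans and a 'while , in A' repeated-scan loop with one single-pass traversal over the characters that maintains two booleans (first '{' dropped / first '}' dropped) and skips every comma.
import Mathlib
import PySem

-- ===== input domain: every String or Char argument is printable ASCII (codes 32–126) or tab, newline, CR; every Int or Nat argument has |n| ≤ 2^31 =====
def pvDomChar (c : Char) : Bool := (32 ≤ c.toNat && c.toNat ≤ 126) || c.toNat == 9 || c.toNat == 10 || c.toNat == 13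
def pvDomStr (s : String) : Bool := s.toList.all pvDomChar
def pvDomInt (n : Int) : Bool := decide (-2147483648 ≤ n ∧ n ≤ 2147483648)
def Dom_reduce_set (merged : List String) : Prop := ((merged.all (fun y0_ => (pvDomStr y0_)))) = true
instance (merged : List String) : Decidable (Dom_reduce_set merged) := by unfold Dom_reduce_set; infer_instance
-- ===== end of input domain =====

-- B replaces A's two .remove scans and the 'while , in A' repeated-scan loop with one
-- single-pass traversal keeping two booleans. Equivalence is about the RETURN value only:
-- both Pythons pop the last element off `merged` in place.

-- ===== PORT A =====
-- while ',' in A: A.remove(',')   (membership is checked first, so .remove = List.erase)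
def pyRemoveAllCommas (A : List String) : List String :=
  if h : "," ∈ A then pyRemoveAllCommas (A.erase ",") else A
termination_by A.length
decreasing_by
  have h1 := List.length_erase_of_mem h
  have h2 := List.length_pos_of_mem h
  omega

def reduce_set (merged : List String) : List String :=
  -- merged.pop(); raises IndexError on [] (excluded by Pre_)
  match PySem.List.pop? merged with
  | none => []
  | some (new_set, _) =>
    let A := new_set.toList.map (fun c => String.ofList [c])   -- list(new_set)
    let A1 := if "{" ∈ A then A.erase "{" else A
    let A2 := if "}" ∈ A1 then A1.erase "}" else A1
    pyRemoveAllCommas A2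

-- ===== PORT B =====
def reduceGo (cs : List Char) (droppedOpen droppedClose : Bool) : List String :=
  match cs with
  | [] => []
  | c :: rest =>
    if c = '{' ∧ droppedOpen = false then reduceGo rest true droppedClose
    else if c = '}' ∧ droppedClose = false then reduceGo rest droppedOpen true
    else if c = ',' then reduceGo rest droppedOpen droppedClose
    else String.ofList [c] :: reduceGo rest droppedOpen droppedClose

def reduce_set_alt (merged : List String) : List String :=
  match PySem.List.pop? merged with
  | none => []
  | some (new_set, _) => reduceGo new_set.toList false false

-- ===== PRECONDITION & SPEC =====
-- Pre_ excludes only the empty list, on which Python A (and B) raise IndexError in merged.pop().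
def Pre_reduce_set (merged : List String) : Prop := merged ≠ []
instance (merged : List String) : Decidable (Pre_reduce_set merged) := by unfold Pre_reduce_set; infer_instance
def pvWitness_reduce_set : List String := ["{1, 2}"]

def Spec_reduce_set (merged : List String) (out : List String) : Prop := out = reduce_set_alt merged
instance (merged : List String) (out : List String) : Decidable (Spec_reduce_set merged out) := by unfold Spec_reduce_set; infer_instance

-- ===== CLAIM (what is proved, stated in full; the proofs are below) =====
def Claim_equal_reduce_set : Prop := ∀ (merged : List String), Dom_reduce_set merged → Pre_reduce_set merged → Spec_reduce_set merged (reduce_set merged)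

-- ===== LEMMAS AND PROOFS =====

-- A's comma-removal loop removes all commas: it is a filter.
theorem pyRemoveAllCommas_eq_filter (A : List String) :
    pyRemoveAllCommas A = A.filter (fun x => x ≠ ",") := by
  induction hn : A.length using Nat.strong_induction_on generalizing A with
  | _ n ih =>
  subst hn
  by_cases h : "," ∈ A
  case pos =>
    have hlt : (A.erase ",").length < A.length := by
      have h1 := List.length_erase_of_mem h
      have h2 := List.length_pos_of_mem h
      omega
    have ihe := ih _ hlt (A.erase ",") rfl
    rw [pyRemoveAllCommas, dif_pos h, ihe]
    clear ihe ih hlt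
    induction A with
    | nil => simp at h
    | cons a l ihl =>
      by_cases ha : a = ","
      · subst ha; simp [List.erase_cons]
      · simp only [List.mem_cons] at h
        have h' : "," ∈ l := by tauto
        simpa [List.erase_cons, ha, List.filter_cons] using ihl h'
  case neg =>
    rw [pyRemoveAllCommas, dif_neg h]
    have hall : ∀ x ∈ A, (fun x => decide (x ≠ ",")) x = true := by
      intro x hx; simp; rintro rfl; exact h hx
    exact (List.filter_eq_self.mpr hall).symm

-- proof helper: A's conditional first-occurrence removal, parameterised by B's flag
def eraseIf (b : Bool) (x : String) (M : List String) : List String :=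
  if b then M else M.erase x

theorem singleton_eq_iff (c d : Char) : (String.ofList [c] = String.ofList [d]) ↔ c = d := by
  constructor
  · intro h
    have h2 := congrArg String.toList h
    simpa [String.toList_ofList] using h2
  · rintro rfl; rfl

theorem singleton_beq (c d : Char) :
    ((String.ofList [c]) == (String.ofList [d])) = decide (c = d) := by
  rw [show ((String.ofList [c]) == (String.ofList [d]))
        = decide (String.ofList [c] = String.ofList [d]) from
      (by cases hd : (String.ofList [c]) == (String.ofList [d]) <;> simp_all),
    decide_eq_decide]
  exact singleton_eq_iff c d

-- B's single pass computes A's erase-erase-filter pipeline, for any flag state.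
theorem reduceGo_eq (cs : List Char) (b1 b2 : Bool) :
    reduceGo cs b1 b2 =
      (eraseIf b2 "}" (eraseIf b1 "{" (cs.map (fun c => String.ofList [c])))).filter (fun x => x ≠ ",") := by
  induction cs generalizing b1 b2 with
  | nil => cases b1 <;> cases b2 <;> simp [reduceGo, eraseIf]
  | cons c rest ih =>
    have hob : ((String.ofList [c]) == "{") = decide (c = '{') := singleton_beq c '{'
    have hcb : ((String.ofList [c]) == "}") = decide (c = '}') := singleton_beq c '}'
    have hmm : (String.ofList [c] = ",") ↔ (c = ',') := singleton_eq_iff c ','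
    by_cases h1 : c = '{'
    · subst h1
      cases b1 with
      | false =>
        rw [show reduceGo ('{' :: rest) false b2 = reduceGo rest true b2 from by
          rw [reduceGo]; rw [if_pos (⟨rfl, rfl⟩ : ('{' = '{' ∧ (false : Bool) = false))]]
        rw [ih]
        simp [eraseIf, List.erase_cons, hob]
      | true =>
        have hne1 : ¬('{' = '{' ∧ (true : Bool) = false) := by simp
        have hne2 : ¬('{' = '}' ∧ b2 = false) := by simp
        rw [show reduceGo ('{' :: rest) true b2
              = String.ofList ['{'] :: reduceGo rest true b2 from by
          rw [reduceGo, if_neg hne1, if_neg hne2, if_neg (by decide : ¬ ('{' = ','))]]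
        rw [ih]
        cases b2 <;> simp [eraseIf, List.erase_cons, hob, hcb, List.filter_cons, hmm]
    · by_cases h2 : c = '}'
      · subst h2
        have hne1 : ¬('}' = '{' ∧ b1 = false) := by simp
        cases b2 with
        | false =>
          rw [show reduceGo ('}' :: rest) b1 false = reduceGo rest b1 true from by
            rw [reduceGo, if_neg hne1,
              if_pos (⟨rfl, rfl⟩ : ('}' = '}' ∧ (false : Bool) = false))]]
          rw [ih]
          cases b1 <;> simp [eraseIf, List.erase_cons, hob, hcb]
        | true =>
          have hne2 : ¬('}' = '}' ∧ (true : Bool) = false) := by simp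
          rw [show reduceGo ('}' :: rest) b1 true
                = String.ofList ['}'] :: reduceGo rest b1 true from by
            rw [reduceGo, if_neg hne1, if_neg hne2, if_neg (by decide : ¬ ('}' = ','))]]
          rw [ih]
          cases b1 <;> simp [eraseIf, List.erase_cons, hob, hcb, List.filter_cons, hmm]
      · have hne1 : ¬(c = '{' ∧ b1 = false) := by simp [h1]
        have hne2 : ¬(c = '}' ∧ b2 = false) := by simp [h2]
        by_cases h3 : c = ','
        · subst h3
          rw [show reduceGo (',' :: rest) b1 b2 = reduceGo rest b1 b2 from by
            rw [reduceGo, if_neg hne1, if_neg hne2, if_pos rfl]]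
          rw [ih]
          cases b1 <;> cases b2 <;>
            simp [eraseIf, List.erase_cons, hob, hcb, h1, h2, List.filter_cons, hmm]
        · rw [show reduceGo (c :: rest) b1 b2
                = String.ofList [c] :: reduceGo rest b1 b2 from by
            rw [reduceGo, if_neg hne1, if_neg hne2, if_neg h3]]
          rw [ih]
          cases b1 <;> cases b2 <;>
            simp [eraseIf, List.erase_cons, hob, hcb, h1, h2, h3, List.filter_cons, hmm]

-- the membership-guarded erase A performs is plain List.erase
theorem erase_guard (M : List String) (x : String) :
    (if x ∈ M then M.erase x else M) = eraseIf false x M := by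
  by_cases h : x ∈ M
  · simp [eraseIf, h]
  · simp [eraseIf, h, List.erase_of_not_mem h]

-- ===== VERDICT (by name: the statement is the Claim_ definition above) =====
theorem reduce_set_spec : Claim_equal_reduce_set := by
  intro merged _ hpre
  unfold Spec_reduce_set reduce_set reduce_set_alt
  cases hp : PySem.List.pop? merged with
  | none => rfl
  | some r =>
    obtain ⟨s, rest⟩ := r
    simp only
    rw [reduceGo_eq, pyRemoveAllCommas_eq_filter, erase_guard, erase_guard]
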